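-- pv_equiv track=rewrite | github.com/sigal23/taxonomy_format | snomed/snomed_extract.py | snomed_is_a_single_father
-- ===== SOURCE A (Python) =====
-- def snomed_is_a_single_father(is_a_dict):
--     # Get descendants by concept id
--     def get_descendants(conc_id):
--         descendants = [conc_id]
--         for child in is_a_dict.get(conc_id, []):
--             descendants += get_descendants(child)
--         return descendants
--
--     child_to_father = {}
--     is_a_single_father = {}
--     disease_descendants = set(get_descendants("404684003"))
--     clinic_find_descendants = set(get_descendants("64572001"))
--
--     # Creating an inverted dictionary - the key is the child and the value is an array of his fathers
--     for f in is_a_dict.keys():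
--         for c in is_a_dict[f]:
--             if c in child_to_father and f not in child_to_father[c]:
--                 child_to_father[c].append(f)
--             elif c not in child_to_father:
--                 child_to_father[c] = [f]
--
--     # Choose the father of a concept according to the following priority - a descendant of a disease,
--     # a descendant of clinical findings, the number of his children
--     # child_to_father will contain child as key and the chosen father as value
--     for c in child_to_father.keys():
--         father_arr = child_to_father[c]
--         if len(father_arr) > 1:
--             father_arr = sorted(father_arr, key=lambda x: (x not in disease_descendants, x not in clinic_find_descendants,
--                                                            -len(is_a_dict[x])))
--         child_to_father[c] = father_arr[0]
--
--     # Create a dictionary of fathers and their children where each concept can have only one father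
--     for c, f in child_to_father.items():
--         if f in is_a_single_father and c not in is_a_single_father[f]:
--             is_a_single_father[f].append(c)
--         elif f not in is_a_single_father:
--             is_a_single_father[f] = [c]
--
--     return is_a_single_father
-- ===== SOURCE B (Python) =====
-- def snomed_is_a_single_father(is_a_dict):
--     # Bounded-iteration reachability closure over a visited set (no path recursion).
--     def reachable(root):
--         seen = {root}
--         for _ in range(len(is_a_dict)):
--             seen = seen | {c for v in seen for c in is_a_dict.get(v, [])}
--         return seen
--
--     disease = reachable("404684003")
--     clinic = reachable("64572001")
--
--     # Inverted index built from a flat edge list in one pass.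
--     parents = {}
--     for c, f in [(c, f) for f, cs in is_a_dict.items() for c in cs]:
--         ps = parents.setdefault(c, [])
--         if f not in ps:
--             ps.append(f)
--
--     # Pick each child's father with min (first minimum = head of A's stable sort)
--     # and group children under their chosen father in the same fused pass.
--     tree = {}
--     for c, ps in parents.items():
--         f = min(ps, key=lambda x: (x not in disease, x not in clinic, -len(is_a_dict[x])))
--         tree.setdefault(f, []).append(c)
--     return tree
-- ===== Notes on version B (the rewrite author's own statement) =====
-- stated objective: alternative
-- what changed: Descendant sets are computed by a bounded one-step reachability closure (len(d) expansion rounds over a visited set) instead of A's unmemoized recursion over all DAG paths; the inverted index is built from a flat edge list, and each child's father is picked with min (first minimum = head of A's stable sort) fused into the grouping pass.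
import Mathlib
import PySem

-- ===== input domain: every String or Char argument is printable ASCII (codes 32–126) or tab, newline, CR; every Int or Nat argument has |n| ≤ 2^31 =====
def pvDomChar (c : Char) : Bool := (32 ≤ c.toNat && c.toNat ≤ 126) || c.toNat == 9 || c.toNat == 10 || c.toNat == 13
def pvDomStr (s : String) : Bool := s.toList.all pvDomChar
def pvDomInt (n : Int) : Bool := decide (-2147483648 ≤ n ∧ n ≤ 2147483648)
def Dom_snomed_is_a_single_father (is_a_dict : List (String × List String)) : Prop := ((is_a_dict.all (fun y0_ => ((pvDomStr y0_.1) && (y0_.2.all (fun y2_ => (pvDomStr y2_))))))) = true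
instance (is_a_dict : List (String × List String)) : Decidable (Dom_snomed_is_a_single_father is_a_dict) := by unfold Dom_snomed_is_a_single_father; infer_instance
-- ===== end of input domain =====

-- B computes descendant sets by a bounded reachability closure (len(d) rounds of one-step
-- expansion) instead of A's recursion over all DAG paths, and picks each child's father with
-- min instead of A's stable sort-then-take-head.

-- is_a_dict.get(v, []) — the dict lookup both Pythons write
def pvChildren (g : List (String × List String)) (v : String) : List String :=
  (PySem.Dict.mk g).getD v []

-- ===== PORT A =====
-- A's recursive get_descendants; Lean needs a fuel argument for the (possibly non-terminating)
-- recursion; fuel g.length+2 always suffices under Pre_ (lemma pvGetDescA_some below);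
-- on fuel exhaustion the port returns none (Python raises RecursionError there — outside Pre_).
mutual
def pvGetDescA (g : List (String × List String)) : Nat → String → Option (List String)
  | 0, _ => none
  | f+1, v => pvGetDescLoop g f (pvChildren g v) [v]
  termination_by f v => (f, 0)
def pvGetDescLoop (g : List (String × List String)) : Nat → List String → List String → Option (List String)
  | _, [], acc => some acc
  | f, c :: cs, acc =>
      match pvGetDescA g f c with
      | none => none
      | some d => pvGetDescLoop g f cs (acc ++ d)
  termination_by f cs acc => (f, cs.length + 1)
end

-- Python's 3-tuple sort key (x not in disease, x not in clinic, -len(d[x])) compared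
-- lexicographically; ported exactly as a 2-key sort with integer first key
-- 2*(x not in disease) + (x not in clinic) — the lexicographic order on two booleans.
-- A overwrites child_to_father[c] with the chosen father while iterating its keys; ported as a
-- fresh dict `chosen` over the same keys in the same order (each key is read once, before its write).
def snomed_is_a_single_father (is_a_dict : List (String × List String)) : List (String × List String) :=
  let fuel := is_a_dict.length + 2
  match pvGetDescA is_a_dict fuel "404684003", pvGetDescA is_a_dict fuel "64572001" with
  | some dd, some cf =>
    let disease := PySem.Set.ofList dd
    let clinic := PySem.Set.ofList cf
    let ctf := ((PySem.Dict.mk is_a_dict).keys).foldl (fun d f =>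
        ((PySem.Dict.mk is_a_dict).getD f []).foldl (fun d c =>
          if d.contains c && !((d.getD c []).contains f) then d.modify c [] (· ++ [f])
          else if !d.contains c then d.insert c [f]
          else d) d) PySem.Dict.empty
    let chosen : PySem.Dict String String := ctf.keys.foldl (fun d c =>
        let fa := ctf.getD c []
        let fa := if 1 < PySem.List.len fa then
            PySem.List.sorted2 fa
              (fun x => ((if disease.contains x then 0 else 2) + (if clinic.contains x then 0 else 1) : Int))
              (fun x => -(PySem.List.len ((PySem.Dict.mk is_a_dict).getD x [])))
          else fa
        d.insert c (PySem.List.pyGetD fa 0 "")) PySem.Dict.empty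
    let tree := chosen.items.foldl (fun d p =>
        if d.contains p.2 && !((d.getD p.2 []).contains p.1) then d.modify p.2 [] (· ++ [p.1])
        else if !d.contains p.2 then d.insert p.2 [p.1]
        else d) PySem.Dict.empty
    tree.items
  | _, _ => []  -- unreachable under Pre_ (A raises RecursionError there)

-- ===== PORT B =====
def snomed_is_a_single_father_alt (is_a_dict : List (String × List String)) : List (String × List String) :=
  let reachable := fun (root : String) =>
    (List.range is_a_dict.length).foldl
      (fun seen _ => PySem.Set.union seen (seen.flatMap (pvChildren is_a_dict)))
      (PySem.Set.ofList [root])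
  let disease := reachable "404684003"
  let clinic := reachable "64572001"
  let parents := (is_a_dict.flatMap (fun p => p.2.map (fun c => (c, p.1)))).foldl
      (fun d q =>
        let d := d.setdefault q.1 []
        if (d.getD q.1 []).contains q.2 then d else d.modify q.1 [] (· ++ [q.2]))
      PySem.Dict.empty
  let tree := parents.items.foldl (fun t p =>
      let f := (PySem.List.min2? p.2
        (fun x => ((if disease.contains x then 0 else 2) + (if clinic.contains x then 0 else 1) : Int))
        (fun x => -(PySem.List.len ((PySem.Dict.mk is_a_dict).getD x [])))).getD ""
      (t.setdefault f []).modify f [] (· ++ [p.1]))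
      PySem.Dict.empty
  tree.items

-- ===== PRECONDITION & SPEC =====
-- reachability closure used only to STATE the precondition (one-step expansion iterated)
def pvStepSet (g : List (String × List String)) (S : PySem.Set String) : PySem.Set String :=
  PySem.Set.update S (S.flatMap (pvChildren g))
def pvCloseN (g : List (String × List String)) (n : Nat) (S : PySem.Set String) : PySem.Set String :=
  (List.range n).foldl (fun s _ => pvStepSet g s) S
-- some vertex reachable from r lies on a directed cycle
def pvHasCycleFromB (g : List (String × List String)) (r : String) : Bool :=
  (pvCloseN g (g.length+1) [r]).any
    (fun v => (pvCloseN g (g.length+1) (PySem.Set.ofList (pvChildren g v))).contains v)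

-- Pre_ excludes association lists with duplicate keys (a Python dict cannot carry them; the
-- assoc-list representation is ambiguous there) and graphs with a directed cycle reachable from
-- either root concept, on which A's unbounded recursion raises RecursionError.
def Pre_snomed_is_a_single_father (is_a_dict : List (String × List String)) : Prop :=
  (is_a_dict.map Prod.fst).Nodup ∧
  pvHasCycleFromB is_a_dict "404684003" = false ∧
  pvHasCycleFromB is_a_dict "64572001" = false
instance (is_a_dict : List (String × List String)) : Decidable (Pre_snomed_is_a_single_father is_a_dict) := by
  unfold Pre_snomed_is_a_single_father; infer_instance

def pvWitness_snomed_is_a_single_father : (List (String × List String)) :=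
  [("404684003", ["band", "clinical"]), ("band", ["x"])]

def Spec_snomed_is_a_single_father (is_a_dict : List (String × List String)) (out : List (String × List String)) : Prop := out = snomed_is_a_single_father_alt is_a_dict
instance (is_a_dict : List (String × List String)) (out : List (String × List String)) : Decidable (Spec_snomed_is_a_single_father is_a_dict out) := by unfold Spec_snomed_is_a_single_father; infer_instance

-- ===== CLAIM (what is proved, stated in full; the proofs are below) =====
def Claim_equal_snomed_is_a_single_father : Prop := ∀ (is_a_dict : List (String × List String)), Dom_snomed_is_a_single_father is_a_dict → Pre_snomed_is_a_single_father is_a_dict → Spec_snomed_is_a_single_father is_a_dict (snomed_is_a_single_father is_a_dict)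

-- ===== LEMMAS AND PROOFS =====

-- directed edge / walks of the is-a graph
def pvEdge (g : List (String × List String)) (u v : String) : Prop := v ∈ pvChildren g u
def pvWalk (g : List (String × List String)) : String → List String → Prop
  | _, [] => True
  | u, w :: ws => pvEdge g u w ∧ pvWalk g w ws
def pvReachesN (g : List (String × List String)) (n : Nat) (u v : String) : Prop :=
  ∃ ws, ws.length = n ∧ pvWalk g u ws ∧ ws.getLastD u = v

theorem pvReachesN_zero (g : List (String × List String)) (u v : String) :
    pvReachesN g 0 u v ↔ u = v := by
  constructor
  · rintro ⟨ws, hl, -, he⟩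
    cases ws with
    | nil => exact he
    | cons a b => simp at hl
  · rintro rfl; exact ⟨[], rfl, trivial, rfl⟩

theorem pvReachesN_succ_front (g : List (String × List String)) (n : Nat) (u v : String) :
    pvReachesN g (n+1) u v ↔ ∃ c, pvEdge g u c ∧ pvReachesN g n c v := by
  constructor
  · rintro ⟨ws, hl, hw, he⟩
    cases ws with
    | nil => simp at hl
    | cons w ws' =>
      obtain ⟨hew, hw'⟩ := hw
      exact ⟨w, hew, ws', by simpa using hl, hw', by rw [List.getLastD_cons] at he; exact he⟩
  · rintro ⟨c, hec, ws, hl, hw, he⟩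
    exact ⟨c :: ws, by simp [hl], ⟨hec, hw⟩, by rw [List.getLastD_cons]; exact he⟩

theorem pvReachesN_succ_back (g : List (String × List String)) (n : Nat) (u v : String) :
    pvReachesN g (n+1) u v ↔ ∃ w, pvReachesN g n u w ∧ pvEdge g w v := by
  induction n generalizing u with
  | zero =>
    rw [pvReachesN_succ_front]
    constructor
    · rintro ⟨c, hec, hr⟩
      rw [pvReachesN_zero] at hr
      exact ⟨u, (pvReachesN_zero g u u).2 rfl, hr ▸ hec⟩
    · rintro ⟨w, hr, hew⟩
      rw [pvReachesN_zero] at hr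
      exact ⟨v, hr ▸ hew, (pvReachesN_zero g v v).2 rfl⟩
  | succ n ih =>
    rw [pvReachesN_succ_front]
    constructor
    · rintro ⟨c, hec, hr⟩
      obtain ⟨w, hrw, hew⟩ := (ih c).1 hr
      exact ⟨w, (pvReachesN_succ_front g n u w).2 ⟨c, hec, hrw⟩, hew⟩
    · rintro ⟨w, hr, hew⟩
      obtain ⟨c, hec, hrw⟩ := (pvReachesN_succ_front g n u w).1 hr
      exact ⟨c, hec, (ih c).2 ⟨w, hrw, hew⟩⟩

theorem pvEdge_key {g : List (String × List String)} {u w : String} (h : pvEdge g u w) :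
    u ∈ g.map Prod.fst := by
  unfold pvEdge pvChildren at h
  rcases hq : (PySem.Dict.mk g).get? u with _ | l
  · simp [PySem.Dict.getD_eq_get?_getD, hq] at h
  · unfold PySem.Dict.get? at hq
    rcases hf : List.find? (fun p => p.1 == u) (PySem.Dict.mk g).items with _ | pr
    · simp [hf] at hq
    · have h1 : pr.1 = u := by
        have := List.find?_some hf
        simpa using this
      have h2 : pr ∈ g := List.mem_of_find?_eq_some hf
      exact h1 ▸ List.mem_map_of_mem h2

theorem pvWalk_prefixReach {g : List (String × List String)} {u : String} {ws : List String}
    (h : pvWalk g u ws) : ∀ j ≤ ws.length, pvReachesN g j u ((u :: ws).getD j "") := by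
  induction ws generalizing u with
  | nil =>
    intro j hj
    have : j = 0 := by simpa using hj
    subst this
    exact (pvReachesN_zero g u u).2 rfl
  | cons w ws ih =>
    intro j hj
    cases j with
    | zero => exact (pvReachesN_zero g u u).2 rfl
    | succ k =>
      have hk : k ≤ ws.length := by simpa using hj
      have := ih h.2 k hk
      rw [pvReachesN_succ_front]
      exact ⟨w, h.1, by simpa using this⟩

theorem pvWalk_suffix {g : List (String × List String)} {u : String} {ws : List String}
    (h : pvWalk g u ws) : ∀ i ≤ ws.length, pvWalk g ((u :: ws).getD i "") (ws.drop i) := by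
  induction ws generalizing u with
  | nil =>
    intro i hi
    have : i = 0 := by simpa using hi
    subst this
    exact h
  | cons w ws ih =>
    intro i hi
    cases i with
    | zero => exact h
    | succ k =>
      have hk : k ≤ ws.length := by simpa using hi
      simpa using ih h.2 k hk

theorem pvWalk_segment {g : List (String × List String)} {u : String} {ws : List String}
    (h : pvWalk g u ws) : ∀ i j, i ≤ j → j ≤ ws.length →
    pvReachesN g (j-i) ((u :: ws).getD i "") ((u :: ws).getD j "") := by
  intro i j hij hj
  obtain ⟨m, rfl⟩ : ∃ m, j = i + m := ⟨j - i, by omega⟩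
  have hi : i ≤ ws.length := by omega
  have hs := pvWalk_suffix h i hi
  have hm : m ≤ (ws.drop i).length := by simp; omega
  have hp := pvWalk_prefixReach hs m hm
  have hend : (((u :: ws).getD i "") :: ws.drop i).getD m "" = (u :: ws).getD (i+m) "" := by
    cases m with
    | zero => simp
    | succ k =>
      have h1 : (((u :: ws).getD i "") :: ws.drop i).getD (k+1) "" = (ws.drop i).getD k "" :=
        List.getD_cons_succ ..
      have h2 : (ws.drop i).getD k "" = ws.getD (i+k) "" := by
        simp [List.getD_eq_getElem?_getD, List.getElem?_drop]
      have h3 : (u :: ws).getD (i+(k+1)) "" = ws.getD (i+k) "" := by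
        have : i+(k+1) = (i+k)+1 := by omega
        rw [this]
        exact List.getD_cons_succ ..
      rw [h1, h2, h3]
  have hsub : i + m - i = m := by omega
  rw [hsub, ← hend]
  exact hp

-- generic bounded-closure membership (instantiated for Pre_'s closure and for port B's loop)
theorem pvFoldStep_mem (g : List (String × List String)) (stp : PySem.Set String → PySem.Set String)
    (hstp : ∀ S x, x ∈ stp S ↔ x ∈ S ∨ ∃ v ∈ S, pvEdge g v x) :
    ∀ (n : Nat) (S : PySem.Set String) (x : String),
      x ∈ (List.range n).foldl (fun s _ => stp s) S ↔ ∃ s ∈ S, ∃ k ≤ n, pvReachesN g k s x := by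
  intro n
  induction n with
  | zero =>
    intro S x
    simp only [List.range_zero, List.foldl_nil]
    constructor
    · intro hx
      exact ⟨x, hx, 0, le_refl _, (pvReachesN_zero g x x).2 rfl⟩
    · rintro ⟨s, hs, k, hk, hr⟩
      have : k = 0 := by omega
      subst this
      rw [pvReachesN_zero] at hr
      exact hr ▸ hs
  | succ n ih =>
    intro S x
    rw [List.range_succ, List.foldl_append]
    simp only [List.foldl_cons, List.foldl_nil]
    rw [hstp]
    constructor
    · rintro (hx | ⟨v, hv, hev⟩)
      · obtain ⟨s, hs, k, hk, hr⟩ := (ih S x).1 hx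
        exact ⟨s, hs, k, by omega, hr⟩
      · obtain ⟨s, hs, k, hk, hr⟩ := (ih S v).1 hv
        exact ⟨s, hs, k+1, by omega, (pvReachesN_succ_back g k s x).2 ⟨v, hr, hev⟩⟩
    · rintro ⟨s, hs, k, hk, hr⟩
      rcases Nat.lt_or_ge k (n+1) with h | h
      · exact Or.inl ((ih S x).2 ⟨s, hs, k, by omega, hr⟩)
      · have : k = n+1 := by omega
        subst this
        obtain ⟨w, hrw, hew⟩ := (pvReachesN_succ_back g n s x).1 hr
        exact Or.inr ⟨w, (ih S w).2 ⟨s, hs, n, le_refl _, hrw⟩, hew⟩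

theorem pvCloseN_mem (g : List (String × List String)) (n : Nat) (S : PySem.Set String) (x : String) :
    x ∈ pvCloseN g n S ↔ ∃ s ∈ S, ∃ k ≤ n, pvReachesN g k s x := by
  refine pvFoldStep_mem g (pvStepSet g) (fun S x => ?_) n S x
  unfold pvStepSet
  rw [PySem.Set.mem_update]
  simp only [List.mem_flatMap]
  exact Iff.rfl

-- under Pre_ no walk from a root is longer than the number of keys
theorem pvNoLongReach {g : List (String × List String)} {r : String}
    (hnd : (g.map Prod.fst).Nodup) (hcyc : pvHasCycleFromB g r = false) :
    ∀ k u, pvReachesN g k r u → k ≤ g.length := by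
  intro k u hr
  by_contra hgt
  rw [Nat.not_le] at hgt
  obtain ⟨ws, hl, hw, he⟩ := hr
  have hlen : g.length < ws.length := by omega
  have main : ∀ (a b : Nat), a < b → b ≤ g.length →
      (r :: ws).getD a "" = (r :: ws).getD b "" → False := by
    intro a b hab hbn heq
    have hprefix := pvWalk_segment hw 0 a (Nat.zero_le a) (by omega)
    rw [Nat.sub_zero, List.getD_cons_zero] at hprefix
    have hcycseg := pvWalk_segment hw a b (by omega) (by omega)
    rw [← heq] at hcycseg
    obtain ⟨m, hm⟩ : ∃ m, b - a = m + 1 := ⟨b - a - 1, by omega⟩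
    rw [hm] at hcycseg
    obtain ⟨c, hec, hcm⟩ := (pvReachesN_succ_front g m _ _).1 hcycseg
    have htrue : pvHasCycleFromB g r = true := by
      unfold pvHasCycleFromB
      rw [List.any_eq_true]
      refine ⟨(r :: ws).getD a "", ?_, ?_⟩
      · exact (pvCloseN_mem g (g.length+1) [r] _).2 ⟨r, by simp, a, by omega, hprefix⟩
      · have hmem : (r :: ws).getD a "" ∈
            pvCloseN g (g.length+1) (PySem.Set.ofList (pvChildren g ((r :: ws).getD a ""))) :=
          (pvCloseN_mem g (g.length+1) _ _).2
            ⟨c, (PySem.Set.mem_ofList _ _).2 hec, m, by omega, hcm⟩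
        simpa using hmem
    rw [htrue] at hcyc
    simp at hcyc
  have hkeys : ∀ a : Fin (g.length+1), ((r :: ws).getD a.val "") ∈ g.map Prod.fst := by
    intro a
    have hseg := pvWalk_segment hw a.val (a.val+1) (by omega) (by omega)
    rw [show a.val+1-a.val = 1 from by omega] at hseg
    obtain ⟨c, hec, -⟩ := (pvReachesN_succ_front g 0 _ _).1 hseg
    exact pvEdge_key hec
  have hcard : ((g.map Prod.fst).toFinset).card = g.length := by
    rw [List.toFinset_card_of_nodup hnd]; simp
  obtain ⟨i, -, j, -, hne, heq⟩ := Finset.exists_ne_map_eq_of_card_lt_of_maps_to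
    (s := (Finset.univ : Finset (Fin (g.length+1))))
    (t := (g.map Prod.fst).toFinset)
    (f := fun a => (r :: ws).getD a.val "")
    (by rw [hcard]; simp)
    (fun a _ => List.mem_toFinset.2 (hkeys a))
  rcases Nat.lt_or_ge i.val j.val with hij | hij
  · exact main i.val j.val hij (by omega) heq
  · have hji : j.val < i.val := by
      rcases Nat.lt_or_ge j.val i.val with h | h
      · exact h
      · exact absurd (Fin.ext (by omega)) hne
    exact main j.val i.val hji (by omega) heq.symm

theorem pvGetDescLoop_none (g : List (String × List String)) (f : Nat) :
    ∀ cs acc, (pvGetDescLoop g f cs acc = none ↔ ∃ c ∈ cs, pvGetDescA g f c = none) := by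
  intro cs
  induction cs with
  | nil => intro acc; simp [pvGetDescLoop]
  | cons c cs ih =>
    intro acc
    rw [pvGetDescLoop]
    rcases hA : pvGetDescA g f c with _ | d
    · simp [hA]
    · simp only [List.mem_cons]
      constructor
      · intro h
        obtain ⟨c', hc', h'⟩ := (ih (acc ++ d)).1 h
        exact ⟨c', Or.inr hc', h'⟩
      · rintro ⟨c', hc' | hc', h'⟩
        · subst hc'; rw [hA] at h'; cases h'
        · exact (ih (acc ++ d)).2 ⟨c', hc', h'⟩

theorem pvGetDescA_none (g : List (String × List String)) :
    ∀ f v, (pvGetDescA g f v = none ↔ ∃ x, pvReachesN g f v x) := by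
  intro f
  induction f with
  | zero =>
    intro v
    exact iff_of_true (by rw [pvGetDescA]) ⟨v, (pvReachesN_zero g v v).2 rfl⟩
  | succ f ih =>
    intro v
    rw [pvGetDescA, pvGetDescLoop_none]
    constructor
    · rintro ⟨c, hc, hnone⟩
      obtain ⟨x, hx⟩ := (ih c).1 hnone
      exact ⟨x, (pvReachesN_succ_front g f v x).2 ⟨c, hc, hx⟩⟩
    · rintro ⟨x, hx⟩
      obtain ⟨c, hc, hcx⟩ := (pvReachesN_succ_front g f v x).1 hx
      exact ⟨c, hc, (ih c).2 ⟨x, hcx⟩⟩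

theorem pvGetDescLoop_mem (g : List (String × List String)) (f : Nat) :
    ∀ cs acc out, pvGetDescLoop g f cs acc = some out →
      ∀ x, (x ∈ out ↔ x ∈ acc ∨ ∃ c ∈ cs, ∃ l, pvGetDescA g f c = some l ∧ x ∈ l) := by
  intro cs
  induction cs with
  | nil =>
    intro acc out h x
    rw [pvGetDescLoop] at h
    cases h
    simp
  | cons c cs ih =>
    intro acc out h x
    rw [pvGetDescLoop] at h
    rcases hA : pvGetDescA g f c with _ | d
    · rw [hA] at h; cases h
    · rw [hA] at h
      rw [ih (acc ++ d) out h x, List.mem_append]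
      simp only [List.mem_cons]
      constructor
      · rintro ((hx | hx) | ⟨c', hc', l, hl, hxl⟩)
        · exact Or.inl hx
        · exact Or.inr ⟨c, Or.inl rfl, d, hA, hx⟩
        · exact Or.inr ⟨c', Or.inr hc', l, hl, hxl⟩
      · rintro (hx | ⟨c', hc' | hc', l, hl, hxl⟩)
        · exact Or.inl (Or.inl hx)
        · subst hc'; rw [hA] at hl; cases hl; exact Or.inl (Or.inr hxl)
        · exact Or.inr ⟨c', hc', l, hl, hxl⟩

theorem pvGetDescA_mem (g : List (String × List String)) :
    ∀ f v l, pvGetDescA g f v = some l →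
      ∀ x, (x ∈ l ↔ ∃ k < f, pvReachesN g k v x) := by
  intro f
  induction f with
  | zero => intro v l h; rw [pvGetDescA] at h; cases h
  | succ f ih =>
    intro v l h x
    rw [pvGetDescA] at h
    rw [pvGetDescLoop_mem g f _ _ _ h x]
    constructor
    · rintro (hx | ⟨c, hc, d, hd, hxd⟩)
      · rw [List.mem_singleton] at hx
        subst hx
        exact ⟨0, by omega, (pvReachesN_zero g x x).2 rfl⟩
      · obtain ⟨k, hk, hr⟩ := (ih c d hd x).1 hxd
        exact ⟨k+1, by omega, (pvReachesN_succ_front g k v x).2 ⟨c, hc, hr⟩⟩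
    · rintro ⟨k, hk, hr⟩
      cases k with
      | zero =>
        rw [pvReachesN_zero] at hr
        exact Or.inl (by simp [hr])
      | succ k =>
        obtain ⟨c, hc, hr'⟩ := (pvReachesN_succ_front g k v x).1 hr
        rcases hA : pvGetDescA g f c with _ | d
        · exfalso
          have hn : pvGetDescLoop g f (pvChildren g v) [v] = none :=
            (pvGetDescLoop_none g f _ _).2 ⟨c, hc, hA⟩
          rw [h] at hn
          cases hn
        · exact Or.inr ⟨c, hc, d, hA, (ih c d hA x).2 ⟨k, by omega, hr'⟩⟩

theorem pvGetDescA_some {g : List (String × List String)} {r : String}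
    (hnd : (g.map Prod.fst).Nodup) (hcyc : pvHasCycleFromB g r = false) :
    ∃ l, pvGetDescA g (g.length + 2) r = some l ∧
      ∀ x, (x ∈ l ↔ ∃ k ≤ g.length, pvReachesN g k r x) := by
  rcases hA : pvGetDescA g (g.length + 2) r with _ | l
  · exfalso
    obtain ⟨x, hx⟩ := (pvGetDescA_none g _ r).1 hA
    have := pvNoLongReach hnd hcyc _ _ hx
    omega
  · refine ⟨l, rfl, fun x => ?_⟩
    rw [pvGetDescA_mem g _ r l hA x]
    constructor
    · rintro ⟨k, hk, hr⟩
      exact ⟨k, pvNoLongReach hnd hcyc _ _ hr, hr⟩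
    · rintro ⟨k, hk, hr⟩
      exact ⟨k, by omega, hr⟩

theorem pvReachB_mem (g : List (String × List String)) (r x : String) :
    x ∈ (List.range g.length).foldl
        (fun seen _ => PySem.Set.union seen (seen.flatMap (pvChildren g)))
        (PySem.Set.ofList [r]) ↔ ∃ k ≤ g.length, pvReachesN g k r x := by
  rw [pvFoldStep_mem g _ (fun S x => by
    rw [PySem.Set.mem_union]
    simp only [List.mem_flatMap]
    exact Iff.rfl)]
  constructor
  · rintro ⟨s, hs, k, hk, hr⟩
    have : s = r := by simpa [PySem.Set.ofList] using hs
    exact ⟨k, hk, this ▸ hr⟩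
  · rintro ⟨k, hk, hr⟩
    exact ⟨r, by simp [PySem.Set.ofList], k, hk, hr⟩

-- head of A's stable sort = B's min (first minimal element), generic in the comparison
theorem pvHead_foldl_insertBy {α : Type} (before : α → α → Bool) :
    ∀ (xs : List α) (acc : List α),
      (xs.foldl (fun a x => PySem.List.insertBy before x a) acc).head? =
      xs.foldl (fun m x => match m with
        | none => some x
        | some m => if before x m then some x else some m) acc.head? := by
  intro xs
  induction xs with
  | nil => intro acc; simp
  | cons x xs ih =>
    intro acc
    simp only [List.foldl_cons]
    rw [ih]
    congr 1
    cases acc with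
    | nil => simp [PySem.List.insertBy]
    | cons y ys =>
      cases h : before x y <;> simp [PySem.List.insertBy, h]

theorem pvSorted2_head (k1 : String → Int) (k2 : String → Int) (fa : List String) :
    (PySem.List.sorted2 fa k1 k2 false).head? = PySem.List.min2? fa k1 k2 := by
  unfold PySem.List.sorted2 PySem.List.min2?
  simp only [Bool.false_eq_true, if_false]
  rw [pvHead_foldl_insertBy]
  rfl

theorem pvChoose_eq_min (g : List (String × List String)) (k1 : String → Int) (k2 : String → Int)
    (fa : List String) :
    PySem.List.pyGetD (if 1 < PySem.List.len fa then PySem.List.sorted2 fa k1 k2 false else fa) 0 ""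
      = (PySem.List.min2? fa k1 k2).getD "" := by
  rcases fa with _ | ⟨a, _ | ⟨b, l⟩⟩
  · rfl
  · rfl
  · have hlen : 1 < PySem.List.len (a :: b :: l) := by
      simp [PySem.List.len]
    rw [if_pos hlen]
    have hperm := PySem.List.sorted2_perm (a :: b :: l) k1 k2 false
    rcases h : PySem.List.sorted2 (a :: b :: l) k1 k2 false with _ | ⟨s, ss⟩
    · rw [h] at hperm
      exact absurd hperm.length_eq (by simp)
    · have hh := pvSorted2_head k1 k2 (a :: b :: l)
      rw [h] at hh
      rw [PySem.List.pyGetD_zero_cons, ← hh]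
      rfl

-- setdefault-then-modify on a fresh key is a plain insert
theorem pvSdModify {d : PySem.Dict String (List String)} {k x : String}
    (h : d.contains k = false) :
    (d.setdefault k []).modify k [] (· ++ [x]) = d.insert k [x] := by
  rw [PySem.Dict.setdefault_of_not_contains d ([]:List String) h]
  show (d.insert k []).insert k (((d.insert k []).getD k []) ++ [x]) = d.insert k [x]
  rw [PySem.Dict.getD_insert_self, List.nil_append, PySem.Dict.insert_insert_self]

-- the two inverted-index builders perform the same per-edge update
theorem pvInvStep_eq (d : PySem.Dict String (List String)) (c f : String) :
    (if d.contains c && !((d.getD c []).contains f) then d.modify c [] (· ++ [f])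
     else if !d.contains c then d.insert c [f] else d)
    = (let d' := d.setdefault c []
       if (d'.getD c []).contains f then d' else d'.modify c [] (· ++ [f])) := by
  cases hc : d.contains c with
  | true =>
    rw [PySem.Dict.setdefault_of_contains d ([]:List String) hc]
    cases hx : (d.getD c []).contains f <;> (simp only [hx]; rfl)
  | false =>
    have h0 : (d.setdefault c []).getD c [] = [] := by
      rw [PySem.Dict.getD_setdefault_self, PySem.Dict.getD_of_not_contains d ([]:List String) hc]
    simp only [h0]
    simp [pvSdModify hc]

-- a nested per-key loop over the dict is the flat loop over the edge list
theorem pvNestedFold {ν : Type} (F : PySem.Dict String ν → String → String → PySem.Dict String ν) :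
    ∀ (g : List (String × List String)) (d : PySem.Dict String ν),
      g.foldl (fun d p => p.2.foldl (fun d c => F d c p.1) d) d
        = (g.flatMap (fun p => p.2.map (fun c => (c, p.1)))).foldl (fun d q => F d q.1 q.2) d := by
  intro g
  induction g with
  | nil => intro d; simp
  | cons p g ih =>
    intro d
    simp only [List.foldl_cons, List.flatMap_cons, List.foldl_append, List.foldl_map]
    exact ih _

-- A's key-indexed outer loop is the structural loop over the pair list (keys are Nodup)
theorem pvABuild_eq_nested {ν : Type} (g : List (String × List String))
    (hnd : (g.map Prod.fst).Nodup) (F : PySem.Dict String ν → String → String → PySem.Dict String ν)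
    (d0 : PySem.Dict String ν) :
    ((PySem.Dict.mk g).keys).foldl (fun d f => ((PySem.Dict.mk g).getD f []).foldl (fun d c => F d c f) d) d0
      = g.foldl (fun d p => p.2.foldl (fun d c => F d c p.1) d) d0 := by
  rw [PySem.Dict.keys_mk, List.foldl_map]
  refine PySem.List.foldl_congr_mem _ _ _ _ (fun d p hp => ?_)
  have hget : (PySem.Dict.mk g).get? p.1 = some p.2 := by
    refine PySem.Dict.get?_of_mem_items (PySem.Dict.mk g) ?_ ?_
    · simpa using hp
    · rw [PySem.Dict.keys_mk]; exact hnd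
  rw [PySem.Dict.getD_eq_get?_getD, hget]
  rfl

-- any fold whose steps are setdefault/modify/insert keeps the keys Nodup
theorem pvNodupKeys_fold {ν : Type} {β : Type} (l : List β)
    (U : PySem.Dict String ν → β → PySem.Dict String ν)
    (hU : ∀ d b, d.keys.Nodup → (U d b).keys.Nodup) :
    ∀ d : PySem.Dict String ν, d.keys.Nodup → (l.foldl U d).keys.Nodup := by
  induction l with
  | nil => intro d h; exact h
  | cons b l ih => intro d h; exact ih (U d b) (hU d b h)

theorem pvUInvB_nodup (d : PySem.Dict String (List String)) (c f : String)
    (h : d.keys.Nodup) :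
    ((d.setdefault c []).modify c [] (· ++ [f])).keys.Nodup ∧ (d.setdefault c []).keys.Nodup := by
  have hsd : (d.setdefault c []).keys.Nodup := by
    cases hc : d.contains c with
    | true => rw [PySem.Dict.setdefault_of_contains d ([]:List String) hc]; exact h
    | false => rw [PySem.Dict.setdefault_of_not_contains d ([]:List String) hc]
               exact PySem.Dict.nodup_keys_insert d c [] h
  exact ⟨PySem.Dict.nodup_keys_insert _ c _ hsd, hsd⟩

-- the two grouping loops agree as long as each incoming child is fresh
theorem pvGroupFold (F : List String → String) :
    ∀ (l : List (String × List String)) (t : PySem.Dict String (List String)),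
      (l.map Prod.fst).Nodup →
      (∀ p ∈ t.items, ∀ x ∈ p.2, x ∉ l.map Prod.fst) →
      l.foldl (fun t p =>
          if t.contains (F p.2) && !((t.getD (F p.2) []).contains p.1) then t.modify (F p.2) [] (· ++ [p.1])
          else if !t.contains (F p.2) then t.insert (F p.2) [p.1] else t) t
        = l.foldl (fun t p => (t.setdefault (F p.2) []).modify (F p.2) [] (· ++ [p.1])) t := by
  intro l
  induction l with
  | nil => intro t _ _; rfl
  | cons p l ih =>
    intro t hnd hinv
    simp only [List.map_cons, List.nodup_cons] at hnd
    have hcfresh : ∀ p' ∈ t.items, p.1 ∉ p'.2 := by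
      intro p' hp' hc
      exact hinv p' hp' p.1 hc (by simp)
    have hstep :
        (if t.contains (F p.2) && !((t.getD (F p.2) []).contains p.1) then t.modify (F p.2) [] (· ++ [p.1])
         else if !t.contains (F p.2) then t.insert (F p.2) [p.1] else t)
        = (t.setdefault (F p.2) []).modify (F p.2) [] (· ++ [p.1]) := by
      cases hf : t.contains (F p.2) with
      | true =>
        rcases hq : t.get? (F p.2) with _ | v
        · rw [PySem.Dict.get?_eq_none_iff_contains] at hq
          rw [hq] at hf; cases hf
        · have hvmem : (F p.2, v) ∈ t.items := PySem.Dict.mem_items_of_get?_eq_some t hq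
          have hcv : v.contains p.1 = false := by
            rcases hx : v.contains p.1 with _ | _
            · rfl
            · exact absurd (List.contains_iff_mem.mp hx) (hcfresh _ hvmem)
          have hgd : t.getD (F p.2) [] = v := PySem.Dict.getD_of_get?_eq_some t [] hq
          rw [PySem.Dict.setdefault_of_contains t ([]:List String) hf]
          simp only [hgd, hcv]
          rfl
      | false =>
        rw [pvSdModify hf]
        rfl
    rw [List.foldl_cons, List.foldl_cons, hstep]
    refine ih _ hnd.2 ?_
    intro p' hp' x hx hmem
    set t' := (t.setdefault (F p.2) []).modify (F p.2) [] (· ++ [p.1]) with ht'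
    have hmain : p' = (F p.2, (t.setdefault (F p.2) []).getD (F p.2) [] ++ [p.1]) ∨
        (p' ∈ (t.setdefault (F p.2) []).items ∧ p'.1 ≠ F p.2) := by
      have := (PySem.Dict.mem_items_insert ((t.setdefault (F p.2) [])) (F p.2)
        ((t.setdefault (F p.2) []).getD (F p.2) [] ++ [p.1]) p').1 hp'
      simpa using this
    have hfromT : ∀ q, q ∈ (t.setdefault (F p.2) []).items → ∀ y ∈ q.2, y ∉ l.map Prod.fst := by
      intro q hq y hy
      cases hc : t.contains (F p.2) with
      | true =>
        rw [PySem.Dict.setdefault_of_contains t ([]:List String) hc] at hq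
        exact fun hm => hinv q hq y hy (by simp [hm])
      | false =>
        rw [PySem.Dict.setdefault_of_not_contains t ([]:List String) hc] at hq
        rcases (PySem.Dict.mem_items_insert _ _ _ _).1 hq with h1 | ⟨h1, -⟩
        · subst h1; simp at hy
        · exact fun hm => hinv q h1 y hy (by simp [hm])
    rcases hmain with h1 | ⟨h1, -⟩
    · subst h1
      simp only [List.mem_append, List.mem_singleton] at hx
      rcases hx with hx | hx
      · cases hc : t.contains (F p.2) with
        | true =>
          rw [PySem.Dict.setdefault_of_contains t ([]:List String) hc] at hx
          rcases hq : t.get? (F p.2) with _ | v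
          · rw [PySem.Dict.getD_eq_get?_getD, hq] at hx; simp at hx
          · have hvmem := PySem.Dict.mem_items_of_get?_eq_some t hq
            rw [PySem.Dict.getD_of_get?_eq_some t [] hq] at hx
            exact hinv _ hvmem x hx (by simp [hmem])
        | false =>
          have h0 : (t.setdefault (F p.2) []).getD (F p.2) [] = [] := by
            rw [PySem.Dict.getD_setdefault_self, PySem.Dict.getD_of_not_contains t ([]:List String) hc]
          rw [h0] at hx; simp at hx
      · subst hx; exact hnd.1 hmem
    · exact hfromT p' h1 x hx hmem

-- the whole post-descendants pipeline, generic in the two membership key functions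
theorem pvPipeline (g : List (String × List String)) (hnd : (g.map Prod.fst).Nodup)
    (k1 k1' k2 : String → Int) (hk : ∀ x, k1 x = k1' x) :
    (let ctf := ((PySem.Dict.mk g).keys).foldl (fun d f =>
        ((PySem.Dict.mk g).getD f []).foldl (fun d c =>
          if d.contains c && !((d.getD c []).contains f) then d.modify c [] (· ++ [f])
          else if !d.contains c then d.insert c [f]
          else d) d) PySem.Dict.empty
     let chosen : PySem.Dict String String := ctf.keys.foldl (fun d c =>
        let fa := ctf.getD c []
        let fa := if 1 < PySem.List.len fa then PySem.List.sorted2 fa k1 k2 false else fa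
        d.insert c (PySem.List.pyGetD fa 0 "")) PySem.Dict.empty
     let tree := chosen.items.foldl (fun d p =>
        if d.contains p.2 && !((d.getD p.2 []).contains p.1) then d.modify p.2 [] (· ++ [p.1])
        else if !d.contains p.2 then d.insert p.2 [p.1]
        else d) PySem.Dict.empty
     tree.items)
    = (let parents := (g.flatMap (fun p => p.2.map (fun c => (c, p.1)))).foldl
          (fun d q =>
            let d := d.setdefault q.1 []
            if (d.getD q.1 []).contains q.2 then d else d.modify q.1 [] (· ++ [q.2]))
          PySem.Dict.empty
       let tree := parents.items.foldl (fun t p =>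
          let f := (PySem.List.min2? p.2 k1' k2).getD ""
          (t.setdefault f []).modify f [] (· ++ [p.1]))
          PySem.Dict.empty
       tree.items) := by
  have hk1 : k1 = k1' := funext hk
  subst hk1
  simp only []
  have hctf : ((PySem.Dict.mk g).keys).foldl (fun d f =>
        ((PySem.Dict.mk g).getD f []).foldl (fun d c =>
          if d.contains c && !((d.getD c []).contains f) then d.modify c [] (· ++ [f])
          else if !d.contains c then d.insert c [f]
          else d) d) PySem.Dict.empty
      = (g.flatMap (fun p => p.2.map (fun c => (c, p.1)))).foldl
          (fun d q =>
            let d := d.setdefault q.1 []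
            if (d.getD q.1 []).contains q.2 then d else d.modify q.1 [] (· ++ [q.2]))
          PySem.Dict.empty :=
    (pvABuild_eq_nested g hnd
      (fun d c f => if d.contains c && !((d.getD c []).contains f) then d.modify c [] (· ++ [f])
          else if !d.contains c then d.insert c [f] else d) PySem.Dict.empty).trans
      ((pvNestedFold
        (fun d c f => if d.contains c && !((d.getD c []).contains f) then d.modify c [] (· ++ [f])
          else if !d.contains c then d.insert c [f] else d) g PySem.Dict.empty).trans
        (PySem.List.foldl_congr_mem _ _ _ _ (fun d q _ => pvInvStep_eq d q.1 q.2)))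
  rw [hctf]
  set P := (g.flatMap (fun p => p.2.map (fun c => (c, p.1)))).foldl
          (fun d q =>
            let d := d.setdefault q.1 []
            if (d.getD q.1 []).contains q.2 then d else d.modify q.1 [] (· ++ [q.2]))
          PySem.Dict.empty with hP
  have hPnd : P.keys.Nodup := by
    rw [hP]
    refine pvNodupKeys_fold _ _ (fun d q hq => ?_) PySem.Dict.empty PySem.Dict.nodup_keys_empty
    simp only []
    split
    · exact (pvUInvB_nodup d q.1 q.2 hq).2
    · exact (pvUInvB_nodup d q.1 q.2 hq).1
  have hchosen : (P.keys.foldl (fun d c =>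
        let fa := P.getD c []
        let fa := if 1 < PySem.List.len fa then PySem.List.sorted2 fa k1 k2 false else fa
        d.insert c (PySem.List.pyGetD fa 0 "")) PySem.Dict.empty).items
      = P.items.map (fun p => (p.1, (PySem.List.min2? p.2 k1 k2).getD "")) := by
    have hfresh := PySem.Dict.items_foldl_insert_fresh P.keys (fun c => c)
      (fun c => PySem.List.pyGetD (if 1 < PySem.List.len (P.getD c []) then
          PySem.List.sorted2 (P.getD c []) k1 k2 false else P.getD c []) 0 "")
      PySem.Dict.empty (fun a _ => by simp [PySem.Dict.contains_empty])
      (by simpa using hPnd)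
    rw [hfresh]
    show ([] : List (String × String)) ++ _ = _
    rw [List.nil_append]
    show (P.items.map (fun x => x.1)).map _ = _
    rw [List.map_map]
    refine List.map_congr_left (fun p hp => ?_)
    have hget : P.get? p.1 = some p.2 :=
      PySem.Dict.get?_of_mem_items P (by simpa using hp) hPnd
    have hgd : P.getD p.1 [] = p.2 := PySem.Dict.getD_of_get?_eq_some P [] hget
    show (p.1, PySem.List.pyGetD (if 1 < PySem.List.len (P.getD p.1 []) then
        PySem.List.sorted2 (P.getD p.1 []) k1 k2 false else P.getD p.1 []) 0 "") = _
    rw [hgd, pvChoose_eq_min g k1 k2 p.2]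
  rw [hchosen, List.foldl_map]
  exact congrArg PySem.Dict.items
    (pvGroupFold (fun ps => (PySem.List.min2? ps k1 k2).getD "") P.items PySem.Dict.empty
      (by simpa [PySem.Dict.keys] using hPnd)
      (fun p hp => by simp [PySem.Dict.empty] at hp))

theorem snomed_is_a_single_father_spec : Claim_equal_snomed_is_a_single_father := by
  intro g hdom hpre
  obtain ⟨hnd, hc1, hc2⟩ := hpre
  obtain ⟨dd, hdd, hddmem⟩ := pvGetDescA_some hnd hc1
  obtain ⟨cf, hcf, hcfmem⟩ := pvGetDescA_some hnd hc2
  unfold Spec_snomed_is_a_single_father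
  unfold snomed_is_a_single_father snomed_is_a_single_father_alt
  simp only [hdd, hcf]
  have hD : ∀ x : String, (PySem.Set.ofList dd).contains x
      = ((List.range g.length).foldl (fun seen _ => PySem.Set.union seen (seen.flatMap (pvChildren g)))
          (PySem.Set.ofList ["404684003"])).contains x := by
    intro x
    rcases h1 : (PySem.Set.ofList dd).contains x with _ | _ <;>
      rcases h2 : ((List.range g.length).foldl (fun seen _ => PySem.Set.union seen (seen.flatMap (pvChildren g)))
          (PySem.Set.ofList ["404684003"])).contains x with _ | _ <;> try rfl
    · exfalso
      have hx : x ∈ dd := by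
        have := (pvReachB_mem g "404684003" x).1 (List.contains_iff_mem.mp h2)
        exact (hddmem x).2 this
      have : (PySem.Set.ofList dd).contains x = true :=
        List.contains_iff_mem.mpr ((PySem.Set.mem_ofList dd x).2 hx)
      rw [h1] at this; cases this
    · exfalso
      have hx := (hddmem x).1 ((PySem.Set.mem_ofList dd x).1 (List.contains_iff_mem.mp h1))
      have : ((List.range g.length).foldl (fun seen _ => PySem.Set.union seen (seen.flatMap (pvChildren g)))
          (PySem.Set.ofList ["404684003"])).contains x = true :=
        List.contains_iff_mem.mpr ((pvReachB_mem g "404684003" x).2 hx)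
      rw [h2] at this; cases this
  have hC : ∀ x : String, (PySem.Set.ofList cf).contains x
      = ((List.range g.length).foldl (fun seen _ => PySem.Set.union seen (seen.flatMap (pvChildren g)))
          (PySem.Set.ofList ["64572001"])).contains x := by
    intro x
    rcases h1 : (PySem.Set.ofList cf).contains x with _ | _ <;>
      rcases h2 : ((List.range g.length).foldl (fun seen _ => PySem.Set.union seen (seen.flatMap (pvChildren g)))
          (PySem.Set.ofList ["64572001"])).contains x with _ | _ <;> try rfl
    · exfalso
      have hx : x ∈ cf := by
        have := (pvReachB_mem g "64572001" x).1 (List.contains_iff_mem.mp h2)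
        exact (hcfmem x).2 this
      have : (PySem.Set.ofList cf).contains x = true :=
        List.contains_iff_mem.mpr ((PySem.Set.mem_ofList cf x).2 hx)
      rw [h1] at this; cases this
    · exfalso
      have hx := (hcfmem x).1 ((PySem.Set.mem_ofList cf x).1 (List.contains_iff_mem.mp h1))
      have : ((List.range g.length).foldl (fun seen _ => PySem.Set.union seen (seen.flatMap (pvChildren g)))
          (PySem.Set.ofList ["64572001"])).contains x = true :=
        List.contains_iff_mem.mpr ((pvReachB_mem g "64572001" x).2 hx)
      rw [h2] at this; cases this
  exact pvPipeline g hnd _ _ _ (fun x => by rw [hD x, hC x])
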